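-- pv_equiv track=rewrite | github.com/ran-ibra/GreenBite | GreenBite-backend/meal_plans/services/ai_fallback.py | fix_unescaped_quotes
-- ===== SOURCE A (Python) =====
-- def fix_unescaped_quotes(json_str: str) -> str:
--     """
--     Attempt to fix unescaped quotes inside JSON strings.
--     This is a heuristic and may not work for all cases.
--     """
--     # Pattern: find "text with ' apostrophe" and don't break it
--     # But find "text with " broken quote" and fix it
--
--     # Simple approach: replace ' with \' inside double-quoted strings
--     # This won't fix all cases but helps with common issues
--
--     parts = []
--     in_string = False
--     escape_next = False
--
--     for i, char in enumerate(json_str):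
--         if escape_next:
--             parts.append(char)
--             escape_next = False
--             continue
--
--         if char == '\\':
--             escape_next = True
--             parts.append(char)
--             continue
--
--         if char == '"':
--             in_string = not in_string
--             parts.append(char)
--         elif char == "'" and in_string:
--             # Replace unescaped single quotes inside strings
--             parts.append("\\'")
--         else:
--             parts.append(char)
--
--     return ''.join(parts)
-- ===== SOURCE B (Python) =====
-- def fix_unescaped_quotes(json_str: str) -> str:
--     """Escape single quotes inside double-quoted JSON strings (heuristic),
--     by staged passes: tokenize escape pairs, split on quotes, transform, rejoin."""
--     # Stage 1: tokenize into backslash-escape pairs and single characters.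
--     tokens = []
--     it = iter(json_str)
--     for c in it:
--         if c == '\\':
--             tokens.append(c + next(it, ''))
--         else:
--             tokens.append(c)
--     # Stage 2: split the token list on the unescaped double quotes.
--     segments = []
--     cur = []
--     for t in tokens:
--         if t == '"':
--             segments.append(cur)
--             cur = []
--         else:
--             cur.append(t)
--     segments.append(cur)
--     # Stage 3: escape lone single quotes in the inside-string segments.
--     fixed = []
--     inside = False
--     for seg in segments:
--         fixed.append(["\\'" if t == "'" else t for t in seg] if inside else seg)
--         inside = not inside
--     # Stage 4: rejoin the segments with the double quotes that separated them.
--     return '"'.join(''.join(seg) for seg in fixed)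
-- ===== Notes on version B (the rewrite author's own statement) =====
-- stated objective: alternative
-- what changed: Replaces A's single-pass character state machine (in_string + escape_next flags) by staged passes: tokenize the string into backslash-escape pairs and single characters, split the token list on unescaped double quotes, escape single quotes in the alternating inside-string segments, and rejoin the segments with double quotes.
import Mathlib
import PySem

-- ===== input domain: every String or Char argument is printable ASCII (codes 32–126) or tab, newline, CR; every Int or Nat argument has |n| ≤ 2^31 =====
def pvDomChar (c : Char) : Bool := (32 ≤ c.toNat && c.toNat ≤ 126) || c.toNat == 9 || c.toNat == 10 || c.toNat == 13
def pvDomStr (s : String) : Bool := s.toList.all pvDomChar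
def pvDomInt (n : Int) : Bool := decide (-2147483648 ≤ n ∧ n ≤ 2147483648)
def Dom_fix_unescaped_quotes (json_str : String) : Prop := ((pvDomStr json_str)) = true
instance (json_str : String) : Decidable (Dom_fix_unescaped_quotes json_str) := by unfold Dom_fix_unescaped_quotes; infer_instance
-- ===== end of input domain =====

-- B replaces A's single-pass character state machine (in_string + escape_next flags)
-- by staged passes: tokenize backslash-escape pairs, split the tokens on unescaped
-- double quotes, escape single quotes in the alternating inside segments, rejoin.

-- ===== PORT A =====
-- A's for-loop, carrying (in_string, escape_next) across iterations; emits chars in order.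
def fixA_go (cs : List Char) (in_string escape_next : Bool) : List Char :=
  match cs with
  | [] => []
  | c :: rest =>
    if escape_next then c :: fixA_go rest in_string false
    else if c = '\\' then c :: fixA_go rest in_string true
    else if c = '"' then c :: fixA_go rest (!in_string) false
    else if c = '\'' ∧ in_string then '\\' :: '\'' :: fixA_go rest in_string false
    else c :: fixA_go rest in_string false

def fix_unescaped_quotes (json_str : String) : String :=
  String.ofList (fixA_go json_str.toList false false)

-- ===== PORT B =====
-- Stage 1: tokenize into backslash-escape pairs and single characters.
def fixB_tokenize (cs : List Char) : List (List Char) :=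
  match cs with
  | [] => []
  | c :: rest =>
    if c = '\\' then
      match rest with
      | [] => [[c]]
      | d :: rest' => [c, d] :: fixB_tokenize rest'
    else [c] :: fixB_tokenize rest

-- Stage 2: split the token list on the unescaped double quotes.
def fixB_split (tokens : List (List Char)) (cur : List (List Char))
    (segments : List (List (List Char))) : List (List (List Char)) :=
  match tokens with
  | [] => segments ++ [cur]
  | t :: rest =>
    if t = ['"'] then fixB_split rest [] (segments ++ [cur])
    else fixB_split rest (cur ++ [t]) segments

-- Stage 3: escape lone single quotes in the inside-string segments.
def fixB_escTok (t : List Char) : List Char :=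
  if t = ['\''] then ['\\', '\''] else t

def fixB_escSegs (segs : List (List (List Char))) (inside : Bool) : List (List (List Char)) :=
  match segs with
  | [] => []
  | s :: ss => (if inside then s.map fixB_escTok else s) :: fixB_escSegs ss (!inside)

-- Stage 4: rejoin the segments with the double quotes that separated them.
def fix_unescaped_quotes_alt (json_str : String) : String :=
  String.ofList (List.intercalate ['"']
    ((fixB_escSegs (fixB_split (fixB_tokenize json_str.toList) [] []) false).map List.flatten))

-- ===== PRECONDITION & SPEC =====
def Spec_fix_unescaped_quotes (json_str : String) (out : String) : Prop := out = fix_unescaped_quotes_alt json_str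
instance (json_str : String) (out : String) : Decidable (Spec_fix_unescaped_quotes json_str out) := by unfold Spec_fix_unescaped_quotes; infer_instance

-- ===== CLAIM (what is proved, stated in full; the proofs are below) =====
def Claim_equal_fix_unescaped_quotes : Prop := ∀ (json_str : String), Dom_fix_unescaped_quotes json_str → Spec_fix_unescaped_quotes json_str (fix_unescaped_quotes json_str)

-- ===== LEMMAS AND PROOFS =====

-- Proof-only: accumulator-free split (head segment, remaining segments).
def split0 (tokens : List (List Char)) : List (List Char) × List (List (List Char)) :=
  match tokens with
  | [] => ([], [])
  | t :: rest =>
    let p := split0 rest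
    if t = ['"'] then ([], p.1 :: p.2) else (t :: p.1, p.2)

-- Proof-only: token-level state machine bridging A's loop and B's pipeline.
def gTok (ts : List (List Char)) (ins : Bool) : List Char :=
  match ts with
  | [] => []
  | t :: rest =>
    if t = ['"'] then '"' :: gTok rest (!ins)
    else if t = ['\''] ∧ ins then '\\' :: '\'' :: gTok rest ins
    else t ++ gTok rest ins

theorem split0_quote (rest : List (List Char)) :
    split0 (['"'] :: rest) = ([], (split0 rest).1 :: (split0 rest).2) := by
  simp [split0]

theorem split0_other (t : List Char) (rest : List (List Char)) (h : t ≠ ['"']) :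
    split0 (t :: rest) = (t :: (split0 rest).1, (split0 rest).2) := by
  simp [split0, h]

theorem gTok_quote (rest : List (List Char)) (ins : Bool) :
    gTok (['"'] :: rest) ins = '"' :: gTok rest (!ins) := by
  conv_lhs => unfold gTok
  rw [if_pos rfl]

theorem gTok_apos (rest : List (List Char)) :
    gTok (['\''] :: rest) true = '\\' :: '\'' :: gTok rest true := by
  conv_lhs => unfold gTok
  rw [if_neg (by decide), if_pos ⟨rfl, rfl⟩]

theorem gTok_other (t : List Char) (rest : List (List Char)) (ins : Bool)
    (hq : t ≠ ['"']) (hs : ¬ (t = ['\''] ∧ ins = true)) :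
    gTok (t :: rest) ins = t ++ gTok rest ins := by
  conv_lhs => unfold gTok
  rw [if_neg hq, if_neg (by simpa using hs)]

theorem tokenize_bs (d : Char) (rest : List Char) :
    fixB_tokenize ('\\' :: d :: rest) = ['\\', d] :: fixB_tokenize rest := by
  conv_lhs => unfold fixB_tokenize
  rw [if_pos rfl]

theorem tokenize_other (c : Char) (rest : List Char) (hb : c ≠ '\\') :
    fixB_tokenize (c :: rest) = [c] :: fixB_tokenize rest := by
  conv_lhs => unfold fixB_tokenize
  rw [if_neg hb]

theorem escSegs_cons (s : List (List Char)) (ss : List (List (List Char))) (ins : Bool) :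
    fixB_escSegs (s :: ss) ins = (if ins then s.map fixB_escTok else s) :: fixB_escSegs ss (!ins) := rfl

theorem fixB_split_eq : ∀ (ts cur acc),
    fixB_split ts cur acc = acc ++ (cur ++ (split0 ts).1) :: (split0 ts).2 := by
  intro ts
  induction ts with
  | nil => intro cur acc; simp [fixB_split, split0]
  | cons t rest ih =>
    intro cur acc
    by_cases h : t = ['"']
    · simp [fixB_split, split0, h, ih]
    · simp [fixB_split, split0, h, ih]

theorem intercalate_append_head (q : Char) (a b : List Char) (xs : List (List Char)) :
    List.intercalate [q] ((a ++ b) :: xs) = a ++ List.intercalate [q] (b :: xs) := by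
  cases xs <;> simp [List.intercalate, List.intersperse]

theorem intercalate_cons (q : Char) (x y : List Char) (xs : List (List Char)) :
    List.intercalate [q] (x :: y :: xs) = x ++ q :: List.intercalate [q] (y :: xs) := by
  simp [List.intercalate, List.intersperse]

-- The token state machine equals B's split/escape/join pipeline.
theorem gTok_eq_pipeline : ∀ (ts : List (List Char)) (ins : Bool),
    gTok ts ins = List.intercalate ['"']
      ((fixB_escSegs ((split0 ts).1 :: (split0 ts).2) ins).map List.flatten) := by
  intro ts
  induction ts with
  | nil => intro ins; cases ins <;> simp [gTok, split0, fixB_escSegs, List.intercalate]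
  | cons t rest ih =>
    intro ins
    by_cases hq : t = ['"']
    · subst hq
      rw [gTok_quote, split0_quote, escSegs_cons, List.map_cons, escSegs_cons,
        List.map_cons, intercalate_cons, ih (!ins), escSegs_cons, List.map_cons]
      cases ins <;> simp
    · rw [split0_other t rest hq, escSegs_cons, List.map_cons]
      by_cases hs : t = ['\''] ∧ ins = true
      · obtain ⟨ht, hins⟩ := hs; subst ht; subst hins
        rw [gTok_apos, if_pos rfl, List.map_cons,
          show fixB_escTok ['\''] = ['\\', '\''] from rfl, List.flatten_cons,
          intercalate_append_head, ih true, escSegs_cons, if_pos rfl, List.map_cons]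
        simp
      · rw [gTok_other t rest ins hq hs]
        cases ins with
        | false =>
          rw [if_neg (by simp), List.flatten_cons, intercalate_append_head, ih false,
            escSegs_cons, if_neg (by simp)]
          simp
        | true =>
          have ht : fixB_escTok t = t := by
            unfold fixB_escTok
            rw [if_neg (fun h => hs ⟨h, rfl⟩)]
          rw [if_pos rfl, List.map_cons, ht, List.flatten_cons, intercalate_append_head,
            ih true, escSegs_cons, if_pos rfl]
          simp

-- A's character loop (no pending escape) equals the token state machine over the tokens.
theorem fixA_go_eq_gTok : ∀ (n : Nat) (cs : List Char), cs.length ≤ n → ∀ (ins : Bool),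
    fixA_go cs ins false = gTok (fixB_tokenize cs) ins := by
  intro n
  induction n with
  | zero =>
    intro cs h ins
    cases cs with
    | nil => rfl
    | cons c rest => simp at h
  | succ n ih =>
    intro cs h ins
    cases cs with
    | nil => rfl
    | cons c rest =>
      simp only [List.length_cons, Nat.succ_le_succ_iff] at h
      by_cases hb : c = '\\'
      · subst hb
        cases rest with
        | nil => simp [fixA_go, fixB_tokenize, gTok]
        | cons d rest' =>
          simp only [List.length_cons] at h
          have hle : rest'.length ≤ n := Nat.le_of_succ_le h
          rw [tokenize_bs, gTok_other ['\\', d] (fixB_tokenize rest') ins (by simp) (by simp),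
            ← ih rest' hle ins]
          simp [fixA_go]
      · rw [tokenize_other c rest hb]
        by_cases hq : c = '"'
        · subst hq
          rw [gTok_quote, ← ih rest h (!ins)]
          simp [fixA_go]
        · by_cases hs : c = '\'' ∧ ins = true
          · obtain ⟨hc, hins⟩ := hs; subst hc; subst hins
            rw [gTok_apos, ← ih rest h true]
            simp [fixA_go, hb]
          · have hs' : ¬ (c = '\'' ∧ ins) := by simpa using hs
            rw [gTok_other [c] (fixB_tokenize rest) ins (by simpa using hq) (by simpa using hs),
              ← ih rest h ins]
            simp [fixA_go, hb, hq, hs']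

-- ===== VERDICT (by name: the statement is the Claim_ definition above) =====
theorem fix_unescaped_quotes_spec : Claim_equal_fix_unescaped_quotes := by
  intro s _
  unfold Spec_fix_unescaped_quotes fix_unescaped_quotes fix_unescaped_quotes_alt
  rw [fixA_go_eq_gTok s.toList.length s.toList (Nat.le_refl _) false,
    gTok_eq_pipeline, fixB_split_eq]
  simp
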